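-- pv_equiv track=rewrite | github.com/scaamp/AI_Devs3 | Secrets/8/main.py | extract_specific_words
-- ===== SOURCE A (Python) =====
-- def extract_specific_words(word_mapping):
--     # Define the specific word references we want to extract
--     word_references = [
--         "A1S53", "A2S27", "A2S28", "A2S29",
--         "A4S5", "A4S22", "A4S23",
--         "A1S13", "A1S15", "A1S16", "A1S17", "A1S10", "A1S19",
--         "A2S62", "A3S31", "A3S32", "A1S22", "A3S34",
--         "A5S37", "A1S4"
--     ]
--
--     # Extract words and maintain the same grouping as in the references
--     extracted_words = []
--     current_group = []
--
--     for ref in word_references: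
--         word = word_mapping.get(ref, f"[{ref} not found]")
--         current_group.append(word)
--
--         # Check if we should start a new group (based on the original grouping)
--         if ref in ["A2S29", "A4S23", "A1S19", "A3S34", "A1S4"]:
--             extracted_words.append(" ".join(current_group))
--             current_group = []
--
--     return extracted_words
-- ===== SOURCE B (Python) =====
-- def extract_specific_words(word_mapping):
--     word_groups = [
--         ["A1S53", "A2S27", "A2S28", "A2S29"],
--         ["A4S5", "A4S22", "A4S23"],
--         ["A1S13", "A1S15", "A1S16", "A1S17", "A1S10", "A1S19"],
--         ["A2S62", "A3S31", "A3S32", "A1S22", "A3S34"],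
--         ["A5S37", "A1S4"],
--     ]
--     return [" ".join(word_mapping.get(ref, f"[{ref} not found]") for ref in group)
--             for group in word_groups]
-- ===== Notes on version B (the rewrite author's own statement) =====
-- stated objective: simpler
-- what changed: Replaces the flat loop with a mutable current_group accumulator and a sentinel-membership flush test by direct nested iteration over an explicit list of groups, joining each group in one comprehension.
import Mathlib
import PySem

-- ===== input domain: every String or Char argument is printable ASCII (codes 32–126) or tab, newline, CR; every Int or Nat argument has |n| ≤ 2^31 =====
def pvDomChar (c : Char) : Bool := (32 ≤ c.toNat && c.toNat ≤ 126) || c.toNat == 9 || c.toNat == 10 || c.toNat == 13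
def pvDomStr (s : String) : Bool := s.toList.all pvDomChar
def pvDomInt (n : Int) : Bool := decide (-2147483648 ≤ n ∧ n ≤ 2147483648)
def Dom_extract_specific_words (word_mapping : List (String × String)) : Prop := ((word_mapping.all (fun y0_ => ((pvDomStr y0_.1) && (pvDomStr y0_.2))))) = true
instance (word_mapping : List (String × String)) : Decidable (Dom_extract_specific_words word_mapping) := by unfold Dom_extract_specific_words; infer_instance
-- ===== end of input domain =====

-- B replaces A's flat loop + sentinel-flush accumulator by direct nested iteration
-- over an explicit list of groups (objective: simpler).

-- ===== PORT A =====
-- literal port: fold over the flat reference list, carrying (extracted_words, current_group)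
def extract_specific_words (word_mapping : List (String × String)) : List String :=
  let word_references : List String := [
    "A1S53", "A2S27", "A2S28", "A2S29",
    "A4S5", "A4S22", "A4S23",
    "A1S13", "A1S15", "A1S16", "A1S17", "A1S10", "A1S19",
    "A2S62", "A3S31", "A3S32", "A1S22", "A3S34",
    "A5S37", "A1S4"]
  let st := word_references.foldl
    (fun (st : List String × List String) ref =>
      let word := PySem.Dict.getD (PySem.Dict.mk word_mapping) ref ("[" ++ ref ++ " not found]")
      let current_group := st.2 ++ [word]
      if ref ∈ ["A2S29", "A4S23", "A1S19", "A3S34", "A1S4"] then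
        (st.1 ++ [PySem.Str.join " " current_group], [])
      else
        (st.1, current_group))
    ([], [])
  st.1

-- ===== PORT B =====
def extract_specific_words_alt (word_mapping : List (String × String)) : List String :=
  let word_groups : List (List String) := [
    ["A1S53", "A2S27", "A2S28", "A2S29"],
    ["A4S5", "A4S22", "A4S23"],
    ["A1S13", "A1S15", "A1S16", "A1S17", "A1S10", "A1S19"],
    ["A2S62", "A3S31", "A3S32", "A1S22", "A3S34"],
    ["A5S37", "A1S4"]]
  word_groups.map (fun group =>
    PySem.Str.join " " (group.map (fun ref =>
      PySem.Dict.getD (PySem.Dict.mk word_mapping) ref ("[" ++ ref ++ " not found]"))))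

-- ===== PRECONDITION & SPEC =====
def Spec_extract_specific_words (word_mapping : List (String × String)) (out : List String) : Prop := out = extract_specific_words_alt word_mapping
instance (word_mapping : List (String × String)) (out : List String) : Decidable (Spec_extract_specific_words word_mapping out) := by unfold Spec_extract_specific_words; infer_instance

-- ===== CLAIM (what is proved, stated in full; the proofs are below) =====
def Claim_equal_extract_specific_words : Prop := ∀ (word_mapping : List (String × String)), Dom_extract_specific_words word_mapping → Spec_extract_specific_words word_mapping (extract_specific_words word_mapping)

-- ===== LEMMAS AND PROOFS =====

-- ===== VERDICT (by name: the statement is the Claim_ definition above) =====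
theorem extract_specific_words_spec : Claim_equal_extract_specific_words := by
  intro wm _
  show extract_specific_words wm = extract_specific_words_alt wm
  simp [extract_specific_words, extract_specific_words_alt]
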